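-- pv_equiv track=rewrite | github.com/calico-team/calico-fa22 | sausages/solutions/sausages_bsearch.py | solve
-- ===== SOURCE A (Python) =====
-- def solve(N: int, K: int, H: list[int], L: list[int]) -> str:
--     """
--     Checks every possible low cut, and binary searches for a high cut that
--     achieves the target. In each iteration, compute the amount of sausage in
--     between by scanning all the sausages.
--     """
--     max_H = max(H)
--     for lo in range(1, max_H):
--         lower_bound, upper_bound = lo + 1, max_H
--         while lower_bound <= upper_bound:
--             hi = (lower_bound + upper_bound) // 2
--
--             total_sausages = 0
--             for i in range(N):
--                 if H[i] > lo and L[i] < hi: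
--                     total_sausages += min(H[i], hi) - max(L[i], lo)
--             if total_sausages == K:
--                 return f'{lo} {hi}'
--
--             if total_sausages < K:
--                 lower_bound = hi + 1
--             else:
--                 upper_bound = hi - 1
--
--     return 'IMPOSSIBLE'
-- ===== SOURCE B (Python) =====
-- def solve(N: int, K: int, H: list[int], L: list[int]) -> str:
--     """
--     Same low-cut scan + binary search on the high cut, but each query
--     total(lo, hi) is answered in O(log N) instead of rescanning all N
--     sausages: the sausages with H[i] > lo form a suffix of the pairs sorted
--     by H (found by binary search); for that suffix, sorted L values and
--     sorted keys max(H[i], L[i]+1) with prefix sums reduce the query sum to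
--     bisections, and the suffix structures are rebuilt only when the suffix
--     changes.
--     """
--     max_H = max(H)
--     n = max(N, 0)
--     pairs = sorted(zip(H[:n], L[:n]), key=lambda t: t[0])
--     sH = [h for h, l in pairs]
--
--     def count_le(s, x):
--         a, b = 0, len(s)
--         while a < b:
--             m = (a + b) // 2
--             if s[m] <= x:
--                 a = m + 1
--             else:
--                 b = m
--         return a
--
--     def build(act):
--         actL = sorted([l for h, l in act])
--         preL = [0]
--         for v in actL:
--             preL.append(preL[-1] + v)
--         bykey = sorted([(max(h, l + 1), h) for h, l in act], key=lambda t: t[0])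
--         keys = [k for k, h in bykey]
--         preHk = [0]
--         for k, h in bykey:
--             preHk.append(preHk[-1] + h)
--         return actL, preL, keys, preHk
--
--     p = 0
--     actL, preL, keys, preHk = build(pairs)
--     for lo in range(1, max_H):
--         p2 = count_le(sH, lo)
--         if p2 != p:
--             p = p2
--             actL, preL, keys, preHk = build(pairs[p:])
--         cl2 = count_le(actL, lo)
--         sl2 = preL[cl2]
--         nl = len(actL)
--         nk = len(keys)
--         lower_bound, upper_bound = lo + 1, max_H
--         while lower_bound <= upper_bound:
--             hi = (lower_bound + upper_bound) // 2
--             a, b = 0, nl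
--             while a < b:
--                 m = (a + b) // 2
--                 if actL[m] <= hi - 1:
--                     a = m + 1
--                 else:
--                     b = m
--             cl = a
--             a, b = 0, nk
--             while a < b:
--                 m = (a + b) // 2
--                 if keys[m] <= hi:
--                     a = m + 1
--                 else:
--                     b = m
--             c1 = a
--             total_sausages = preHk[c1] + hi * (cl - c1) - (preL[cl] - sl2 + lo * cl2)
--             if total_sausages == K:
--                 return f'{lo} {hi}'
--             if total_sausages < K:
--                 lower_bound = hi + 1
--             else:
--                 upper_bound = hi - 1
--
--     return 'IMPOSSIBLE'
-- ===== Notes on version B (the rewrite author's own statement) =====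
-- stated objective: faster
-- what changed: Each binary-search query total(lo,hi) is answered by O(log N) bisections instead of an O(N) rescan: the sausages with H[i] > lo are a suffix of the pairs sorted by H (located by binary search, with sorted-L / sorted-key max(H[i],L[i]+1) prefix-sum structures rebuilt only when the suffix changes); intended as faster, and a timing run measured B well above 10x faster at the largest size both programs finished, though each suffix rebuild costs O(N), so on adversarial inputs where A itself times out B can time out too.
-- outside the precondition, e.g. on solve(2, 1, [5, 1], [0]): A returns '1 2', B returns '1 2'; on solve(2, 4, [5, 1], [0]): A returns '1 5', B returns '1 5'
import Mathlib
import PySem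

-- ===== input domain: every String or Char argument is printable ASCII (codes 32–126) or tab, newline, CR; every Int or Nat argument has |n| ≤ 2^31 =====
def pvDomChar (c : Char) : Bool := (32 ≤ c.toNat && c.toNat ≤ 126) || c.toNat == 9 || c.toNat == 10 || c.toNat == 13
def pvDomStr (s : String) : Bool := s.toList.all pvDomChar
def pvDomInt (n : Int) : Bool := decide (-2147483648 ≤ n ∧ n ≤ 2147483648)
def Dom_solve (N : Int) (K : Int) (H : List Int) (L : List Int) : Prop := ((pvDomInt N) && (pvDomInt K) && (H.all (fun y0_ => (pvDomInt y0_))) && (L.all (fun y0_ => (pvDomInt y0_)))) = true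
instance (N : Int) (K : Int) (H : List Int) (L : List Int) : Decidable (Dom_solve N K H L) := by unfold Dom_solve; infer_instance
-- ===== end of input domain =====

-- B answers each binary-search query total(lo,hi) by O(log N) bisections — over the suffix
-- of the H-sorted sausage pairs with H > lo, using sorted L-values and keys max(H,L+1) with
-- prefix sums, rebuilt only when the suffix changes — instead of rescanning all N sausages
-- per query (intended as faster; a timing run measured B well above 10x faster at the
-- largest size both programs finished).

-- ===== PORT A =====

-- the inner 'for i in range(N)' scan of A
def totalA (N : Int) (H L : List Int) (lo hi : Int) : Int :=
  (PySem.List.pyRange 0 N 1).foldl (fun acc i =>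
    if PySem.List.pyGetD H i 0 > lo ∧ PySem.List.pyGetD L i 0 < hi then
      acc + (min (PySem.List.pyGetD H i 0) hi - max (PySem.List.pyGetD L i 0) lo)
    else acc) 0

-- the 'while lower_bound <= upper_bound' loop of A
def bsearchA (N K : Int) (H L : List Int) (lo lb ub : Int) : Option String :=
  if h : lb ≤ ub then
    let hi := PySem.Int.floordiv (lb + ub) 2
    let t := totalA N H L lo hi
    if t = K then some (PySem.Int.toStr lo ++ " " ++ PySem.Int.toStr hi)
    else if t < K then bsearchA N K H L lo (hi + 1) ub
    else bsearchA N K H L lo lb (hi - 1)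
  else none
termination_by (ub + 1 - lb).toNat
decreasing_by
  all_goals
    have hmid := PySem.Int.floordiv_two_mid_bounds h
    omega

-- the 'for lo in range(1, max_H)' loop of A (early return = Option)
def outerA (N K : Int) (H L : List Int) (maxH : Int) : List Int → String
  | [] => "IMPOSSIBLE"
  | lo :: rest =>
    match bsearchA N K H L lo (lo + 1) maxH with
    | some s => s
    | none => outerA N K H L maxH rest

def solve (N : Int) (K : Int) (H : List Int) (L : List Int) : String :=
  match PySem.List.max? H (fun x => x) with
  | none => ""   -- max(H) raises ValueError on empty H; excluded by Pre_
  | some maxH => outerA N K H L maxH (PySem.List.pyRange 1 maxH 1)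

-- ===== PORT B =====

-- the hand-written 'count_le' binary search of Source B (also transliterates the
-- two inline 'while a < b' searches of the query loop, which are this same loop)
def countLE (s : List Int) (x : Int) (a b : Int) : Int :=
  if h : a < b then
    let m := PySem.Int.floordiv (a + b) 2
    if PySem.List.pyGetD s m 0 ≤ x then countLE s x (m + 1) b else countLE s x a m
  else a
termination_by (b - a).toNat
decreasing_by
  all_goals
    have hmid := PySem.Int.floordiv_two_mid_bounds (le_of_lt h)
    have hlt : PySem.Int.floordiv (a + b) 2 < b := by
      rw [PySem.Int.floordiv_lt_iff_lt_mul (by omega)]; omega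
    omega

-- the 'pre = [0]; for v in xs: pre.append(pre[-1] + v)' loops of Source B
def prefixSums (s : List Int) : List Int :=
  s.foldl (fun pre v => pre ++ [PySem.List.pyGetD pre (-1) 0 + v]) [0]

-- Source B's build(act)
def buildB (act : List (Int × Int)) : List Int × List Int × List Int × List Int :=
  let actL := PySem.List.sorted (act.map (fun hl => hl.2)) (fun v => v) false
  let preL := prefixSums actL
  let bykey := PySem.List.sorted (act.map (fun hl => (max hl.1 (hl.2 + 1), hl.1))) (fun t => t.1) false
  let keys := bykey.map (fun t => t.1)
  let preHk := bykey.foldl (fun pre t => pre ++ [PySem.List.pyGetD pre (-1) 0 + t.2]) [0]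
  (actL, preL, keys, preHk)

-- the 'while lower_bound <= upper_bound' loop of Source B (cl2/sl2 hoisted per lo)
def bsearchB (actL preL keys preHk : List Int) (K lo cl2 sl2 lb ub : Int) : Option String :=
  if h : lb ≤ ub then
    let hi := PySem.Int.floordiv (lb + ub) 2
    let cl := countLE actL (hi - 1) 0 actL.length
    let c1 := countLE keys hi 0 keys.length
    let t := PySem.List.pyGetD preHk c1 0 + hi * (cl - c1) -
      (PySem.List.pyGetD preL cl 0 - sl2 + lo * cl2)
    if t = K then some (PySem.Int.toStr lo ++ " " ++ PySem.Int.toStr hi)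
    else if t < K then bsearchB actL preL keys preHk K lo cl2 sl2 (hi + 1) ub
    else bsearchB actL preL keys preHk K lo cl2 sl2 lb (hi - 1)
  else none
termination_by (ub + 1 - lb).toNat
decreasing_by
  all_goals
    have hmid := PySem.Int.floordiv_two_mid_bounds h
    omega

-- the 'for lo in range(1, max_H)' loop of Source B, carrying the suffix pointer p
-- and the built structures S, rebuilt when the pointer moves
def outerB (pairs : List (Int × Int)) (sH : List Int) (K maxH : Int) :
    Int → (List Int × List Int × List Int × List Int) → List Int → String
  | _, _, [] => "IMPOSSIBLE"
  | p, S, lo :: rest =>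
    let p2 := countLE sH lo 0 sH.length
    let S2 := if p2 ≠ p then buildB (PySem.List.slice pairs (some p2) none) else S
    let cl2 := countLE S2.1 lo 0 S2.1.length
    let sl2 := PySem.List.pyGetD S2.2.1 cl2 0
    match bsearchB S2.1 S2.2.1 S2.2.2.1 S2.2.2.2 K lo cl2 sl2 (lo + 1) maxH with
    | some s => s
    | none => outerB pairs sH K maxH p2 S2 rest

def solve_alt (N : Int) (K : Int) (H : List Int) (L : List Int) : String :=
  match PySem.List.max? H (fun x => x) with
  | none => ""   -- max(H) raises ValueError on empty H; excluded by Pre_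
  | some maxH =>
    let n : Int := max N 0
    let pairs := PySem.List.sorted
      ((PySem.List.slice H none (some n)).zip (PySem.List.slice L none (some n))) (fun t => t.1) false
    let sH := pairs.map (fun t => t.1)
    outerB pairs sH K maxH 0 (buildB pairs) (PySem.List.pyRange 1 maxH 1)

-- ===== PRECONDITION & SPEC =====

-- Pre_ restricts to inputs where A returns normally: H nonempty (A's max(H) raises
-- ValueError on []) and — unless every height is ≤ 1, in which case no cut is tried —
-- the first N entries of H and L must exist (A raises IndexError otherwise, except in
-- the corner where every H entry from index len(L) on is ≤ 1, which Pre_ also excludes).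
def Pre_solve (N : Int) (K : Int) (H : List Int) (L : List Int) : Prop :=
  H ≠ [] ∧ ((∀ x ∈ H, x ≤ 1) ∨ (N ≤ (H.length : Int) ∧ N ≤ (L.length : Int)))
instance (N : Int) (K : Int) (H : List Int) (L : List Int) : Decidable (Pre_solve N K H L) := by
  unfold Pre_solve; infer_instance

def pvWitness_solve : Int × Int × List Int × List Int := (2, 2, [3, 2], [1, 0])

def Spec_solve (N : Int) (K : Int) (H : List Int) (L : List Int) (out : String) : Prop := out = solve_alt N K H L
instance (N : Int) (K : Int) (H : List Int) (L : List Int) (out : String) : Decidable (Spec_solve N K H L out) := by unfold Spec_solve; infer_instance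

-- ===== CLAIM (what is proved, stated in full; the proofs are below) =====
def Claim_equal_solve : Prop := ∀ (N : Int) (K : Int) (H : List Int) (L : List Int), Dom_solve N K H L → Pre_solve N K H L → Spec_solve N K H L (solve N K H L)

-- ===== LEMMAS AND PROOFS =====

theorem getD_mono (s : List Int) (hs : s.Pairwise (· ≤ ·)) (i j : Nat) (hij : i ≤ j)
    (hj : j < s.length) : s.getD i 0 ≤ s.getD j 0 := by
  rcases Nat.eq_or_lt_of_le hij with rfl | hlt
  · exact le_refl _
  · rw [List.getD_eq_getElem s 0 (by omega), List.getD_eq_getElem s 0 hj]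
    exact List.pairwise_iff_getElem.mp hs i j (by omega) hj hlt

theorem countLE_spec (s : List Int) (x : Int) (hs : s.Pairwise (· ≤ ·)) :
    ∀ fuel : Nat, ∀ a b : Int, (b - a).toNat = fuel → 0 ≤ a → a ≤ b → b ≤ (s.length : Int) →
    (∀ i : Nat, (i : Int) < a → s.getD i 0 ≤ x) →
    (∀ i : Nat, b ≤ (i : Int) → i < s.length → x < s.getD i 0) →
    0 ≤ countLE s x a b ∧ countLE s x a b ≤ (s.length : Int) ∧
      (∀ i : Nat, (i : Int) < countLE s x a b → s.getD i 0 ≤ x) ∧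
      (∀ i : Nat, countLE s x a b ≤ (i : Int) → i < s.length → x < s.getD i 0) := by
  intro fuel
  induction fuel using Nat.strong_induction_on with
  | _ fuel ih =>
    intro a b hf ha hab hb hlow hhigh
    rw [countLE]
    by_cases h : a < b
    · simp only [h, dite_true]
      have hmid := PySem.Int.floordiv_two_mid_bounds (le_of_lt h)
      have hltb : PySem.Int.floordiv (a + b) 2 < b := by
        rw [PySem.Int.floordiv_lt_iff_lt_mul (by omega)]; omega
      set m := PySem.Int.floordiv (a + b) 2 with hm
      have hm0 : 0 ≤ m := by omega
      have hmlen : m < (s.length : Int) := by omega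
      have hgd : PySem.List.pyGetD s m 0 = s.getD m.toNat 0 := by
        rw [PySem.List.pyGetD_of_nonneg s 0 hm0]
      by_cases hc : PySem.List.pyGetD s m 0 ≤ x
      · simp only [hc, if_true]
        refine ih (b - (m + 1)).toNat (by omega) (m + 1) b (by omega) (by omega) (by omega) hb ?_ hhigh
        intro i hi
        calc s.getD i 0 ≤ s.getD m.toNat 0 := getD_mono s hs i m.toNat (by omega) (by omega)
          _ ≤ x := by rw [← hgd]; exact hc
      · simp only [hc, if_false]
        refine ih (m - a).toNat (by omega) a m (by omega) ha (by omega) (by omega) hlow ?_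
        intro i hi hilen
        have : s.getD m.toNat 0 ≤ s.getD i 0 := getD_mono s hs m.toNat i (by omega) hilen
        rw [← hgd] at this; omega
    · simp only [h, dite_false]
      exact ⟨ha, by omega, hlow, by intro i hi hilen; exact hhigh i (by omega) hilen⟩

theorem prefixSums_aux (s : List Int) : ∀ (p : List Int) (t : Int),
    PySem.List.pyGetD p (-1) 0 = t →
    s.foldl (fun pre v => pre ++ [PySem.List.pyGetD pre (-1) 0 + v]) p
      = p ++ (List.range s.length).map (fun k => t + (s.take (k + 1)).sum) := by
  induction s with
  | nil => intro p t _; simp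
  | cons v s' ih =>
    intro p t ht
    simp only [List.foldl_cons, ht]
    rw [ih (p ++ [t + v]) (t + v) (PySem.List.pyGetD_neg_one_append_singleton p (t + v) 0)]
    rw [List.append_assoc]
    congr 1
    simp only [List.length_cons, List.range_succ_eq_map, List.map_cons, List.map_map]
    simp only [List.take_succ_cons, List.sum_cons, List.take_zero, List.sum_nil]
    simp only [List.singleton_append]
    congr 1
    · ring
    · apply List.map_congr_left
      intro k _
      simp only [Function.comp_apply]
      ring

theorem prefixSums_getD (s : List Int) (k : Int) (h0 : 0 ≤ k) (hk : k ≤ (s.length : Int)) :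
    PySem.List.pyGetD (prefixSums s) k 0 = (s.take k.toNat).sum := by
  have he : prefixSums s = [0] ++ (List.range s.length).map (fun j => 0 + (s.take (j + 1)).sum) := by
    unfold prefixSums
    exact prefixSums_aux s [0] 0 rfl
  rw [PySem.List.pyGetD_of_nonneg _ 0 h0, he]
  rcases Nat.eq_zero_or_pos k.toNat with hz | hp
  · simp [hz]
  · rw [List.getD_eq_getElem _ 0 (by simp; omega)]
    obtain ⟨j, hj⟩ : ∃ j, k.toNat = j + 1 := ⟨k.toNat - 1, by omega⟩
    simp only [hj, List.singleton_append, List.getElem_cons_succ, List.getElem_map,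
      List.getElem_range, zero_add]

theorem sum_ite_take {α : Type} (s : List α) (k w : α → Int) (t : Int) (c : Nat)
    (hc : c ≤ s.length)
    (h1 : ∀ i : Nat, i < c → (hil : i < s.length) → k s[i] ≤ t)
    (h2 : ∀ i : Nat, c ≤ i → (hil : i < s.length) → t < k s[i]) :
    (s.map (fun a => if k a ≤ t then w a else 0)).sum = ((s.take c).map w).sum := by
  conv_lhs => rw [← List.take_append_drop c s]
  rw [List.map_append, List.sum_append]
  have hA : (s.take c).map (fun a => if k a ≤ t then w a else 0) = (s.take c).map w := by
    apply List.ext_getElem (by simp)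
    intro i hi hi'
    simp only [List.getElem_map, List.getElem_take]
    have hil : i < s.length := by simp at hi'; omega
    rw [if_pos (h1 i (by simp at hi'; omega) hil)]
  have hB : (s.drop c).map (fun a => if k a ≤ t then w a else 0)
      = (s.drop c).map (fun _ => (0 : Int)) := by
    apply List.ext_getElem (by simp)
    intro i hi hi'
    simp only [List.getElem_map, List.getElem_drop]
    have hil : c + i < s.length := by simp at hi'; omega
    rw [if_neg (by have := h2 (c + i) (by omega) hil; omega)]
  rw [hA, hB, PySem.List.sum_map_const_int]
  ring

theorem sorted_sums {α : Type} (xs : List α) (key w : α → Int) (t : Int)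
    (s : List α) (hs : s = PySem.List.sorted xs key false)
    (c : Int) (hc : c = countLE (s.map key) t 0 ((s.map key).length : Int)) :
    0 ≤ c ∧ c ≤ (s.length : Int) ∧
      (xs.map (fun a => if key a ≤ t then w a else 0)).sum = ((s.take c.toNat).map w).sum ∧
      (xs.map (fun a => if key a ≤ t then (1 : Int) else 0)).sum = c := by
  have hpw : (s.map key).Pairwise (· ≤ ·) := by
    rw [hs]
    have := PySem.List.sorted_pairwise xs key
    exact (List.pairwise_map).mpr this
  obtain ⟨h0, hlen, hlow, hhigh⟩ :=
    countLE_spec (s.map key) t hpw (((s.map key).length : Int) - 0).toNat 0 ((s.map key).length : Int)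
      rfl (by omega) (by simp) (by omega) (by intro i hi; omega) (by intro i hi hil; omega)
  rw [← hc] at h0 hlen hlow hhigh
  have hslen : (s.map key).length = s.length := by simp
  have hgd : ∀ i : Nat, (hil : i < s.length) → (s.map key).getD i 0 = key s[i] := by
    intro i hil
    rw [List.getD_eq_getElem _ 0 (by simp; omega), List.getElem_map]
  have hperm : ∀ g : α → Int, (xs.map g).sum = (s.map g).sum := by
    intro g
    exact (List.Perm.sum_eq (List.Perm.map g (by rw [hs]; exact PySem.List.sorted_perm xs key false))).symm
  have h1 : ∀ i : Nat, i < c.toNat → (hil : i < s.length) → key s[i] ≤ t := by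
    intro i hi hil
    have := hlow i (by omega)
    rwa [hgd i hil] at this
  have h2 : ∀ i : Nat, c.toNat ≤ i → (hil : i < s.length) → t < key s[i] := by
    intro i hi hil
    have := hhigh i (by omega) (by omega)
    rwa [hgd i hil] at this
  refine ⟨h0, by omega, ?_, ?_⟩
  · rw [hperm, sum_ite_take s key w t c.toNat (by omega) h1 h2]
  · rw [hperm, sum_ite_take s key (fun _ => (1 : Int)) t c.toNat (by omega) h1 h2,
      PySem.List.sum_map_const_int, List.length_take]
    omega

theorem sum_comb {α : Type} (l : List α) (f g1 g2 g3 g4 g5 g6 : α → Int) (c1 c2 : Int)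
    (hpt : ∀ a ∈ l, f a = g1 a + c1 * (g2 a - g3 a) - (g4 a - g5 a + c2 * g6 a)) :
    (l.map f).sum = (l.map g1).sum + c1 * ((l.map g2).sum - (l.map g3).sum) -
      ((l.map g4).sum - (l.map g5).sum + c2 * (l.map g6).sum) := by
  induction l with
  | nil => simp
  | cons a l ih =>
    simp only [List.map_cons, List.sum_cons]
    rw [ih (fun b hb => hpt b (List.mem_cons_of_mem a hb)), hpt a List.mem_cons_self]
    ring

theorem point_id (h l lo hi : Int) (hh : lo < h) (hlohi : lo < hi) :
    (if h > lo ∧ l < hi then min h hi - max l lo else 0)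
      = (if max h (l + 1) ≤ hi then h else 0)
        + hi * ((if l ≤ hi - 1 then (1 : Int) else 0) - (if max h (l + 1) ≤ hi then (1 : Int) else 0))
        - ((if l ≤ hi - 1 then l else 0) - (if l ≤ lo then l else 0)
            + lo * (if l ≤ lo then (1 : Int) else 0)) := by
  split_ifs <;> ring_nf <;> omega

theorem totalA_eq_zipsum (N : Int) (H L : List Int) (lo hi : Int)
    (hH : N ≤ (H.length : Int)) (hL : N ≤ (L.length : Int)) :
    totalA N H L lo hi = (((H.take N.toNat).zip (L.take N.toNat)).map
      (fun pr => if pr.1 > lo ∧ pr.2 < hi then min pr.1 hi - max pr.2 lo else 0)).sum := by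
  unfold totalA
  rw [PySem.List.foldl_congr_mem _ _
      (fun acc i => acc +
        (if PySem.List.pyGetD H i 0 > lo ∧ PySem.List.pyGetD L i 0 < hi then
          min (PySem.List.pyGetD H i 0) hi - max (PySem.List.pyGetD L i 0) lo else 0)) 0
      (by intro acc i _; dsimp only; split_ifs <;> omega)]
  rw [PySem.List.foldl_add]
  rcases le_or_gt 0 N with hN | hN
  · set nt := N.toNat with hnt
    have hNn : N = (nt : Int) := by omega
    rw [hNn, PySem.List.pyRange_zero_natCast nt, List.map_map]
    have hz : ((H.take nt).zip (L.take nt)).length = nt := by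
      simp [List.length_zip]; omega
    have : (List.range nt).map
        ((fun i => if PySem.List.pyGetD H i 0 > lo ∧ PySem.List.pyGetD L i 0 < hi then
            min (PySem.List.pyGetD H i 0) hi - max (PySem.List.pyGetD L i 0) lo else 0)
          ∘ (fun k : Nat => (k : Int)))
        = ((H.take nt).zip (L.take nt)).map
            (fun pr => if pr.1 > lo ∧ pr.2 < hi then min pr.1 hi - max pr.2 lo else 0) := by
      apply List.ext_getElem (by simp [hz])
      intro i hi1 hi2
      have hiN : i < nt := by simp at hi1; omega
      have hiH : i < H.length := by omega
      have hiL : i < L.length := by omega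
      simp only [List.getElem_map, List.getElem_range, Function.comp_apply,
        PySem.List.pyGetD_natCast, List.getElem_zip, List.getElem_take]
      rw [List.getD_eq_getElem H 0 hiH, List.getD_eq_getElem L 0 hiL]
    rw [this]
    ring
  · have h1 : PySem.List.pyRange 0 N = [] := PySem.List.pyRange_one_eq_nil (by omega)
    have h2 : N.toNat = 0 := by omega
    rw [h1, h2]
    simp

theorem total_eq (N : Int) (H L : List Int) (lo hi : Int)
    (hH : N ≤ (H.length : Int)) (hL : N ≤ (L.length : Int)) (hlohi : lo < hi)
    (pairs : List (Int × Int))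
    (hpairs : pairs = PySem.List.sorted
      ((PySem.List.slice H none (some (max N 0))).zip (PySem.List.slice L none (some (max N 0))))
      (fun t => t.1) false)
    (p2 : Int)
    (hp2 : p2 = countLE (pairs.map (fun t => t.1)) lo 0 ((pairs.map (fun t => t.1)).length : Int))
    (act : List (Int × Int)) (hact : act = PySem.List.slice pairs (some p2) none) :
    totalA N H L lo hi =
      PySem.List.pyGetD (buildB act).2.2.2
          (countLE (buildB act).2.2.1 hi 0 ((buildB act).2.2.1.length : Int)) 0
        + hi * (countLE (buildB act).1 (hi - 1) 0 ((buildB act).1.length : Int)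
                 - countLE (buildB act).2.2.1 hi 0 ((buildB act).2.2.1.length : Int))
        - (PySem.List.pyGetD (buildB act).2.1
              (countLE (buildB act).1 (hi - 1) 0 ((buildB act).1.length : Int)) 0
            - PySem.List.pyGetD (buildB act).2.1
                (countLE (buildB act).1 lo 0 ((buildB act).1.length : Int)) 0
            + lo * countLE (buildB act).1 lo 0 ((buildB act).1.length : Int)) := by
  -- slices are takes
  have hmaxt : (max N 0).toNat = N.toNat := by omega
  have hslH : PySem.List.slice H none (some (max N 0)) = H.take N.toNat := by
    rw [PySem.List.slice_to H (by omega), hmaxt]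
  have hslL : PySem.List.slice L none (some (max N 0)) = L.take N.toNat := by
    rw [PySem.List.slice_to L (by omega), hmaxt]
  rw [hslH, hslL] at hpairs
  -- the pointer p2 splits pairs at lo
  have hpw : (pairs.map (fun t => t.1)).Pairwise (· ≤ ·) := by
    rw [hpairs]
    exact (List.pairwise_map).mpr
      (PySem.List.sorted_pairwise ((H.take N.toNat).zip (L.take N.toNat)) (fun t : Int × Int => t.1))
  obtain ⟨hp0, hplen, hplow, hphigh⟩ :=
    countLE_spec (pairs.map (fun t => t.1)) lo hpw
      (((pairs.map (fun t => t.1)).length : Int) - 0).toNat 0 _ rfl (by omega) (by simp)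
      (by omega) (by intro i hi; omega) (by intro i hi hil; omega)
  rw [← hp2] at hp0 hplen hplow hphigh
  have hplen' : p2 ≤ (pairs.length : Int) := by simpa using hplen
  have hact' : act = pairs.drop p2.toNat := by
    rw [hact, PySem.List.slice_from pairs hp0]
  have hfst : ∀ i : Nat, (hil : i < pairs.length) →
      (pairs.map (fun t => t.1)).getD i 0 = pairs[i].1 := by
    intro i hil
    rw [List.getD_eq_getElem _ 0 (by simp; omega), List.getElem_map]
  -- totalA as a sum over act
  rw [totalA_eq_zipsum N H L lo hi hH hL]
  set f : Int × Int → Int :=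
    fun pr => if pr.1 > lo ∧ pr.2 < hi then min pr.1 hi - max pr.2 lo else 0 with hf
  have hper : (((H.take N.toNat).zip (L.take N.toNat)).map f).sum = (pairs.map f).sum :=
    (List.Perm.sum_eq (List.Perm.map f
      (by
        rw [hpairs]
        exact PySem.List.sorted_perm ((H.take N.toNat).zip (L.take N.toNat))
          (fun t : Int × Int => t.1) false))).symm
  have hsplit : (pairs.map f).sum = (act.map f).sum := by
    conv_lhs => rw [← List.take_append_drop p2.toNat pairs]
    rw [List.map_append, List.sum_append, ← hact']
    have hz : (pairs.take p2.toNat).map f = (pairs.take p2.toNat).map (fun _ => (0 : Int)) := by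
      apply List.ext_getElem (by simp)
      intro i hi1 hi2
      have hil : i < pairs.length := by simp at hi1; omega
      have hip : i < p2.toNat := by simp at hi1; omega
      simp only [List.getElem_map, List.getElem_take]
      have h1 := hplow i (by omega)
      rw [hfst i hil] at h1
      simp only [hf]
      rw [if_neg (by omega)]
    rw [hz, PySem.List.sum_map_const_int]
    ring
  have hactive : ∀ a ∈ act, lo < a.1 := by
    intro a ha
    rw [hact'] at ha
    obtain ⟨i, hi', hval⟩ := List.getElem_of_mem ha
    have hdl : (pairs.drop p2.toNat).length = pairs.length - p2.toNat := by simp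
    have hml : (pairs.map (fun t : Int × Int => t.1)).length = pairs.length := by simp
    have hil : p2.toNat + i < pairs.length := by omega
    have := hphigh (p2.toNat + i) (by omega) (by omega)
    rw [hfst (p2.toNat + i) hil] at this
    rw [← hval, List.getElem_drop]
    exact this
  rw [hper, hsplit]
  -- build components
  set actL := PySem.List.sorted (act.map (fun hl => hl.2)) (fun v => v) false with hactL
  set bykey := PySem.List.sorted (act.map (fun hl => (max hl.1 (hl.2 + 1), hl.1)))
    (fun t => t.1) false with hbykey
  set keys := bykey.map (fun t => t.1) with hkeys
  have hbuild : buildB act = (actL, prefixSums actL, keys,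
      bykey.foldl (fun pre t => pre ++ [PySem.List.pyGetD pre (-1) 0 + t.2]) [0]) := rfl
  have hpreHk : bykey.foldl (fun pre t => pre ++ [PySem.List.pyGetD pre (-1) 0 + t.2]) [0]
      = prefixSums (bykey.map (fun t => t.2)) := by
    unfold prefixSums
    rw [List.foldl_map]
  rw [hbuild, hpreHk]
  simp only []
  set c1 := countLE keys hi 0 (keys.length : Int) with hc1
  set clA := countLE actL (hi - 1) 0 (actL.length : Int) with hclA
  set cl2 := countLE actL lo 0 (actL.length : Int) with hcl2
  have hmapidA : actL.map (fun v : Int => v) = actL := by simp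
  -- key-side sums
  obtain ⟨hk0, hklen, hksum, hkcnt⟩ :=
    sorted_sums (act.map (fun hl => (max hl.1 (hl.2 + 1), hl.1))) (fun t => t.1) (fun t => t.2)
      hi bykey hbykey c1 (by rw [hc1, hkeys])
  rw [List.map_map] at hksum hkcnt
  have hg1 : (act.map ((fun a : Int × Int => if a.1 ≤ hi then a.2 else 0)
        ∘ (fun hl : Int × Int => (max hl.1 (hl.2 + 1), hl.1))))
      = act.map (fun a => if max a.1 (a.2 + 1) ≤ hi then a.1 else 0) :=
    List.map_congr_left (fun a _ => rfl)
  have hg3 : (act.map ((fun a : Int × Int => if a.1 ≤ hi then (1 : Int) else 0)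
        ∘ (fun hl : Int × Int => (max hl.1 (hl.2 + 1), hl.1))))
      = act.map (fun a => if max a.1 (a.2 + 1) ≤ hi then (1 : Int) else 0) :=
    List.map_congr_left (fun a _ => rfl)
  rw [hg1] at hksum
  rw [hg3] at hkcnt
  have hksum' : (act.map (fun a => if max a.1 (a.2 + 1) ≤ hi then a.1 else 0)).sum
      = PySem.List.pyGetD (prefixSums (bykey.map (fun t => t.2))) c1 0 := by
    rw [hksum, prefixSums_getD _ c1 hk0 (by simp; omega), List.map_take]
  -- L-side sums at hi - 1
  obtain ⟨hA0, hAlen, hAsum, hAcnt⟩ :=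
    sorted_sums (act.map (fun hl => hl.2)) (fun v => v) (fun v => v) (hi - 1) actL hactL
      clA (by rw [hclA, hmapidA])
  rw [List.map_map] at hAsum hAcnt
  have hg4 : (act.map ((fun a : Int => if a ≤ hi - 1 then a else 0)
        ∘ (fun hl : Int × Int => hl.2)))
      = act.map (fun a => if a.2 ≤ hi - 1 then a.2 else 0) :=
    List.map_congr_left (fun a _ => rfl)
  have hg2 : (act.map ((fun a : Int => if a ≤ hi - 1 then (1 : Int) else 0)
        ∘ (fun hl : Int × Int => hl.2)))
      = act.map (fun a => if a.2 ≤ hi - 1 then (1 : Int) else 0) :=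
    List.map_congr_left (fun a _ => rfl)
  rw [hg4] at hAsum
  rw [hg2] at hAcnt
  have hAsum' : (act.map (fun a => if a.2 ≤ hi - 1 then a.2 else 0)).sum
      = PySem.List.pyGetD (prefixSums actL) clA 0 := by
    rw [hAsum, prefixSums_getD _ clA hA0 (by omega), List.map_take, hmapidA]
  -- L-side sums at lo
  obtain ⟨hB0, hBlen, hBsum, hBcnt⟩ :=
    sorted_sums (act.map (fun hl => hl.2)) (fun v => v) (fun v => v) lo actL hactL
      cl2 (by rw [hcl2, hmapidA])
  rw [List.map_map] at hBsum hBcnt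
  have hg5 : (act.map ((fun a : Int => if a ≤ lo then a else 0)
        ∘ (fun hl : Int × Int => hl.2)))
      = act.map (fun a => if a.2 ≤ lo then a.2 else 0) :=
    List.map_congr_left (fun a _ => rfl)
  have hg6 : (act.map ((fun a : Int => if a ≤ lo then (1 : Int) else 0)
        ∘ (fun hl : Int × Int => hl.2)))
      = act.map (fun a => if a.2 ≤ lo then (1 : Int) else 0) :=
    List.map_congr_left (fun a _ => rfl)
  rw [hg5] at hBsum
  rw [hg6] at hBcnt
  have hBsum' : (act.map (fun a => if a.2 ≤ lo then a.2 else 0)).sum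
      = PySem.List.pyGetD (prefixSums actL) cl2 0 := by
    rw [hBsum, prefixSums_getD _ cl2 hB0 (by omega), List.map_take, hmapidA]
  -- combine
  rw [sum_comb act f
      (fun a => if max a.1 (a.2 + 1) ≤ hi then a.1 else 0)
      (fun a => if a.2 ≤ hi - 1 then (1 : Int) else 0)
      (fun a => if max a.1 (a.2 + 1) ≤ hi then (1 : Int) else 0)
      (fun a => if a.2 ≤ hi - 1 then a.2 else 0)
      (fun a => if a.2 ≤ lo then a.2 else 0)
      (fun a => if a.2 ≤ lo then (1 : Int) else 0)
      hi lo
      (fun a ha => point_id a.1 a.2 lo hi (hactive a ha) hlohi)]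
  rw [hksum', hkcnt, hAsum', hAcnt, hBsum', hBcnt]

theorem bsearch_eq (N K : Int) (H L : List Int) (actL preL keys preHk : List Int)
    (lo cl2 sl2 : Int)
    (htot : ∀ hi : Int, lo < hi →
      totalA N H L lo hi =
        PySem.List.pyGetD preHk (countLE keys hi 0 (keys.length : Int)) 0
          + hi * (countLE actL (hi - 1) 0 (actL.length : Int)
                   - countLE keys hi 0 (keys.length : Int))
          - (PySem.List.pyGetD preL (countLE actL (hi - 1) 0 (actL.length : Int)) 0
              - sl2 + lo * cl2)) :
    ∀ fuel : Nat, ∀ lb ub : Int, (ub + 1 - lb).toNat = fuel → lo < lb →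
      bsearchA N K H L lo lb ub = bsearchB actL preL keys preHk K lo cl2 sl2 lb ub := by
  intro fuel
  induction fuel using Nat.strong_induction_on with
  | _ fuel ih =>
    intro lb ub hf hlb
    rw [bsearchA, bsearchB]
    by_cases h : lb ≤ ub
    · simp only [h, dite_true]
      have hmid := PySem.Int.floordiv_two_mid_bounds h
      set hi := PySem.Int.floordiv (lb + ub) 2 with hhi
      rw [← htot hi (by omega)]
      set t := totalA N H L lo hi with ht
      by_cases h1 : t = K
      · simp only [h1, if_true]
      · simp only [h1, if_false]
        by_cases h2 : t < K
        · simp only [h2, if_true]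
          exact ih (ub + 1 - (hi + 1)).toNat (by omega) (hi + 1) ub (by omega) (by omega)
        · simp only [h2, if_false]
          exact ih (hi - 1 + 1 - lb).toNat (by omega) lb (hi - 1) (by omega) (by omega)
    · simp only [h, dite_false]

theorem outer_eq (N K : Int) (H L : List Int) (maxH : Int)
    (hH : N ≤ (H.length : Int)) (hL : N ≤ (L.length : Int))
    (pairs : List (Int × Int))
    (hpairs : pairs = PySem.List.sorted
      ((PySem.List.slice H none (some (max N 0))).zip (PySem.List.slice L none (some (max N 0))))
      (fun t => t.1) false)
    (sH : List Int) (hsH : sH = pairs.map (fun t => t.1)) :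
    ∀ los : List Int, ∀ p : Int,
      ∀ S : List Int × List Int × List Int × List Int,
      S = buildB (PySem.List.slice pairs (some p) none) →
      outerA N K H L maxH los = outerB pairs sH K maxH p S los := by
  intro los
  induction los with
  | nil => intro p S _; rfl
  | cons lo rest ih =>
    intro p S hS
    rw [outerA, outerB]
    set p2 := countLE sH lo 0 (sH.length : Int) with hp2
    have hS2 : (if p2 ≠ p then buildB (PySem.List.slice pairs (some p2) none) else S)
        = buildB (PySem.List.slice pairs (some p2) none) := by
      by_cases hpp : p2 = p
      · simp only [hpp, ne_eq, not_true_eq_false, if_false, hS]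
      · simp only [ne_eq, hpp, not_false_eq_true, if_true]
    rw [hS2]
    have htot : ∀ hi : Int, lo < hi →
        totalA N H L lo hi =
          PySem.List.pyGetD (buildB (PySem.List.slice pairs (some p2) none)).2.2.2
              (countLE (buildB (PySem.List.slice pairs (some p2) none)).2.2.1 hi 0
                (((buildB (PySem.List.slice pairs (some p2) none)).2.2.1.length : Int))) 0
            + hi * (countLE (buildB (PySem.List.slice pairs (some p2) none)).1 (hi - 1) 0
                      (((buildB (PySem.List.slice pairs (some p2) none)).1.length : Int))
                     - countLE (buildB (PySem.List.slice pairs (some p2) none)).2.2.1 hi 0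
                        (((buildB (PySem.List.slice pairs (some p2) none)).2.2.1.length : Int)))
            - (PySem.List.pyGetD (buildB (PySem.List.slice pairs (some p2) none)).2.1
                  (countLE (buildB (PySem.List.slice pairs (some p2) none)).1 (hi - 1) 0
                    (((buildB (PySem.List.slice pairs (some p2) none)).1.length : Int))) 0
                - PySem.List.pyGetD (buildB (PySem.List.slice pairs (some p2) none)).2.1
                    (countLE (buildB (PySem.List.slice pairs (some p2) none)).1 lo 0
                      (((buildB (PySem.List.slice pairs (some p2) none)).1.length : Int))) 0
                + lo * countLE (buildB (PySem.List.slice pairs (some p2) none)).1 lo 0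
                    (((buildB (PySem.List.slice pairs (some p2) none)).1.length : Int))) := by
      intro hi hlt
      exact total_eq N H L lo hi hH hL hlt pairs hpairs p2 (by rw [hp2, hsH]) _ rfl
    rw [← bsearch_eq N K H L _ _ _ _ lo _ _ htot ((maxH + 1 - (lo + 1)).toNat) (lo + 1) maxH
      rfl (by omega)]
    cases bsearchA N K H L lo (lo + 1) maxH with
    | none => exact ih p2 _ rfl
    | some s => rfl

-- ===== VERDICT (by name: the statement is the Claim_ definition above) =====
theorem solve_spec : Claim_equal_solve := by
  unfold Claim_equal_solve
  intro N K H L hdom hpre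
  unfold Spec_solve
  obtain ⟨hne, hcases⟩ := hpre
  unfold solve solve_alt
  cases hmax : PySem.List.max? H (fun x => x) with
  | none => rfl
  | some m =>
    simp only []
    rcases hcases with h1 | h2
    · have hm : m ∈ H := PySem.List.max?_mem hmax
      have hm1 : m ≤ 1 := h1 m hm
      have hr : PySem.List.pyRange 1 m = [] := PySem.List.pyRange_one_eq_nil (by omega)
      rw [hr]
      rfl
    · obtain ⟨hH, hL⟩ := h2
      have hzero : PySem.List.slice
          (PySem.List.sorted ((PySem.List.slice H none (some (max N 0))).zip
            (PySem.List.slice L none (some (max N 0)))) (fun t => t.1) false) (some 0) none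
          = PySem.List.sorted ((PySem.List.slice H none (some (max N 0))).zip
            (PySem.List.slice L none (some (max N 0)))) (fun t => t.1) false := by
        rw [PySem.List.slice_from _ (le_refl 0)]
        simp
      exact outer_eq N K H L m hH hL _ rfl _ rfl _ 0 _ (by rw [hzero])
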